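-- pv_equiv track=rewrite | github.com/stwalsh/canonbot | scripts/parse_kipling.py | _cap_word
-- ===== SOURCE A (Python) =====
-- def _cap_word(word: str) -> str:
--     """Capitalize first alpha char, lowercase rest. Handles Mc/Mac prefixes."""
--     if not word:
--         return word
--     result = []
--     found_alpha = False
--     for c in word:
--         if c.isalpha() and not found_alpha:
--             result.append(c.upper())
--             found_alpha = True
--         elif c.isalpha():
--             result.append(c.lower())
--         else:
--             result.append(c)
--     capped = "".join(result)
--     # Handle Mc prefix: McAndrews, McAndrew
--     if capped.startswith("Mc") and len(capped) > 2 and capped[2].islower():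
--         capped = "Mc" + capped[2].upper() + capped[3:]
--     return capped
-- ===== SOURCE B (Python) =====
-- def _cap_word(word: str) -> str:
--     """Capitalize first alpha char, lowercase rest. Handles Mc/Mac prefixes."""
--     i = next((i for i, c in enumerate(word) if c.isalpha()), None)
--     if i is None:
--         return word
--     capped = word[:i] + word[i].upper() + word[i + 1:].lower()
--     # Handle Mc prefix: McAndrews, McAndrew
--     if capped.startswith("Mc") and len(capped) > 2 and capped[2].islower():
--         capped = "Mc" + capped[2].upper() + capped[3:]
--     return capped
-- ===== Notes on version B (the rewrite author's own statement) =====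
-- stated objective: simpler
-- what changed: Replaced the flag-driven per-character accumulator loop by a single first-alpha-index search followed by bulk slicing (prefix + one upper-cased char + lower-cased remainder), keeping the identical Mc-prefix fixup.
import Mathlib
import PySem

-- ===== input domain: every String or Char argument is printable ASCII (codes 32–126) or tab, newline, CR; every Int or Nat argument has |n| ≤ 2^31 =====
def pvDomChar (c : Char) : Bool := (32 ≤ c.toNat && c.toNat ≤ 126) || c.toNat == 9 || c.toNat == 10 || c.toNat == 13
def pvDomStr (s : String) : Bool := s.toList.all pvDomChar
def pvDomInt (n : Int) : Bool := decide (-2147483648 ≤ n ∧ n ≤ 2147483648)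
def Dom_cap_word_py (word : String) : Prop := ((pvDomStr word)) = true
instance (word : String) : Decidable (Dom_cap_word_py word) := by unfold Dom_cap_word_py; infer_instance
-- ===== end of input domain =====

-- B replaces A's flag-driven per-character loop by a first-alpha-index search plus bulk
-- slicing (prefix ++ upper-cased char ++ lower-cased remainder); objective: simpler.


-- ===== PORT A =====
-- Mc-prefix fixup, identical final lines of both Pythons:
-- if capped.startswith("Mc") and len(capped) > 2 and capped[2].islower(): "Mc" + capped[2].upper() + capped[3:]
def mcFix (capped : List Char) : List Char :=
  if PySem.Chars.startswith capped ['M', 'c'] && decide (2 < capped.length)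
      && PySem.Chars.islower (capped.getD 2 ' ') then
    'M' :: 'c' :: PySem.Chars.upperChar (capped.getD 2 ' ') :: capped.drop 3
  else capped

-- the for-loop over word with the found_alpha flag, appending to result
def capWordLoop : List Char → Bool → List Char
  | [], _ => []
  | c :: rest, found =>
    if PySem.Chars.isalpha c && !found then
      PySem.Chars.upperChar c :: capWordLoop rest true
    else if PySem.Chars.isalpha c then
      PySem.Chars.lowerChar c :: capWordLoop rest found
    else
      c :: capWordLoop rest found

def cap_word_py (word : String) : String :=
  if word = "" then word
  else String.ofList (mcFix (capWordLoop word.toList false))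

-- ===== PORT B =====
def cap_word_py_alt (word : String) : String :=
  match word.toList.findIdx? PySem.Chars.isalpha with
  | none => word
  | some i =>
    let cs := word.toList
    String.ofList (mcFix (cs.take i ++
      PySem.Chars.upperChar (cs.getD i ' ') :: PySem.Chars.lower (cs.drop (i + 1))))

-- ===== PRECONDITION & SPEC =====
def Spec_cap_word_py (word : String) (out : String) : Prop := out = cap_word_py_alt word
instance (word : String) (out : String) : Decidable (Spec_cap_word_py word out) := by unfold Spec_cap_word_py; infer_instance

-- ===== CLAIM (what is proved, stated in full; the proofs are below) =====
def Claim_equal_cap_word_py : Prop := ∀ (word : String), Dom_cap_word_py word → Spec_cap_word_py word (cap_word_py word)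

-- ===== LEMMAS AND PROOFS =====
lemma lowerChar_of_not_alpha (c : Char) (h : PySem.Chars.isalpha c = false) :
    PySem.Chars.lowerChar c = c := by
  have hu : PySem.Chars.isupper c = false := by
    simpa [PySem.Chars.isalpha, Bool.or_eq_false_iff] using (Bool.or_eq_false_iff.mp (by simpa [PySem.Chars.isalpha] using h)).1
  simp [PySem.Chars.lowerChar, hu]

lemma capWordLoop_true (cs : List Char) :
    capWordLoop cs true = PySem.Chars.lower cs := by
  induction cs with
  | nil => simp [capWordLoop, PySem.Chars.lower]
  | cons c rest ih =>
    by_cases h : PySem.Chars.isalpha c = true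
    · simp [capWordLoop, h, ih, PySem.Chars.lower]
    · simp only [Bool.not_eq_true] at h
      simp [capWordLoop, h, ih, PySem.Chars.lower, lowerChar_of_not_alpha c h]

lemma capWordLoop_false (cs : List Char) :
    capWordLoop cs false =
      match cs.findIdx? PySem.Chars.isalpha with
      | none => cs
      | some i => cs.take i ++
          PySem.Chars.upperChar (cs.getD i ' ') :: PySem.Chars.lower (cs.drop (i + 1)) := by
  induction cs with
  | nil => simp [capWordLoop]
  | cons c rest ih =>
    by_cases h : PySem.Chars.isalpha c = true
    · simp [capWordLoop, h, List.findIdx?_cons, capWordLoop_true]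
    · simp only [Bool.not_eq_true] at h
      rw [capWordLoop]
      simp only [h, Bool.false_and, Bool.not_false]
      rw [ih]
      cases hf : rest.findIdx? PySem.Chars.isalpha with
      | none => simp [List.findIdx?_cons, h, hf]
      | some j => simp [List.findIdx?_cons, h, hf, List.getD]

lemma mcFix_no_alpha (cs : List Char)
    (hall : ∀ c ∈ cs, PySem.Chars.isalpha c = false) : mcFix cs = cs := by
  unfold mcFix
  rw [if_neg]
  intro hcond
  have hsw : PySem.Chars.startswith cs ['M', 'c'] = true := by
    rcases Bool.and_eq_true_iff.mp hcond with ⟨h1, _⟩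
    exact (Bool.and_eq_true_iff.mp h1).1
  have hpre : ['M', 'c'] <+: cs := (PySem.Chars.startswith_iff cs ['M', 'c']).mp hsw
  have hM : 'M' ∈ cs := hpre.mem (by simp)
  have := hall 'M' hM
  simp [PySem.Chars.isalpha, PySem.Chars.isupper] at this

-- ===== VERDICT (by name: the statement is the Claim_ definition above) =====
theorem cap_word_py_spec : Claim_equal_cap_word_py := by
  intro word _
  unfold Spec_cap_word_py cap_word_py cap_word_py_alt
  cases hf : word.toList.findIdx? PySem.Chars.isalpha with
  | none =>
    have hall : ∀ c ∈ word.toList, PySem.Chars.isalpha c = false := by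
      intro c hc
      have := List.findIdx?_eq_none_iff.mp hf
      simpa using this c hc
    by_cases hw : word = ""
    · simp [hw]
    · simp only [if_neg hw]
      rw [capWordLoop_false, hf]
      simp only [mcFix_no_alpha _ hall]
      simp
  | some i =>
    have hne : word ≠ "" := by
      intro hw
      rw [hw] at hf
      simp at hf
    simp only [if_neg hne]
    rw [capWordLoop_false, hf]
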